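-- pv_equiv track=rewrite | github.com/EricCharnesky/CIS2001-Winter2023 | MidtermReview/main.py | _recursive_scramble
-- ===== SOURCE A (Python) =====
-- def _recursive_scramble(some_string, new_string, start_index, end_index):
--     if start_index < end_index:
--         new_string += some_string[start_index]
--         new_string += some_string[end_index]
--         start_index += 1
--         end_index -= 1
--         return _recursive_scramble(some_string, new_string, start_index, end_index)
--     elif start_index == end_index:
--         new_string += some_string[start_index]
--         return new_string
--     else:
--         return new_string
-- ===== SOURCE B (Python) =====
-- def _recursive_scramble(some_string, new_string, start_index, end_index):
--     pairs = end_index - start_index + 1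
--     for k in range((pairs + 1) // 2):
--         lo = start_index + k
--         hi = end_index - k
--         new_string += some_string[lo]
--         if lo != hi:
--             new_string += some_string[hi]
--     return new_string
-- ===== Notes on version B (the rewrite author's own statement) =====
-- stated objective: simpler
-- what changed: Replaced the two-index tail recursion by a single counted for-loop: the pair count (end-start+2)//2 is computed in closed form and one loop index k reads both ends (start+k, end-k), with an equality test replacing the recursion's three-way branch.
import Mathlib
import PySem

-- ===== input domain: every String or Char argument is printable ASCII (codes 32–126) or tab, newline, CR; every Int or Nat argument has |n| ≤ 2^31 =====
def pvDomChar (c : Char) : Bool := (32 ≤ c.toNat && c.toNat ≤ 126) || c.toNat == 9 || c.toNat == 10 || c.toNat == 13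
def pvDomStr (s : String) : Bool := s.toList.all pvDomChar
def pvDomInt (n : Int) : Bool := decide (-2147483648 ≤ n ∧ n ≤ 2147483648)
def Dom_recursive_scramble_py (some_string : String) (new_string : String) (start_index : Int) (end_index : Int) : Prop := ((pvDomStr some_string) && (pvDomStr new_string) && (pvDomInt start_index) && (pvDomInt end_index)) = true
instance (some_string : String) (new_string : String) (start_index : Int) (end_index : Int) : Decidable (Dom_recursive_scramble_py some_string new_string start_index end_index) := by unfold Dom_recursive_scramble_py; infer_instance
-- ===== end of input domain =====

-- B replaces A's two-index tail recursion by a single counted for-loop over the closed-form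
-- pair count (pairs+1)//2, reading both ends with one loop index (objective: simpler).

-- ===== PORT A =====
-- literal transliteration of A's recursion on (chars, accumulator, two indices);
-- a 'none' from pyGet? is Python's IndexError, excluded by Pre_ (the port then stops with the accumulator).
def recursive_scramble_pyCore (s : List Char) (acc : List Char) (i j : Int) : List Char :=
  if _h : i < j then
    match PySem.List.pyGet? s i, PySem.List.pyGet? s j with
    | some a, some b => recursive_scramble_pyCore s (acc ++ [a] ++ [b]) (i + 1) (j - 1)
    | _, _ => acc      -- IndexError (outside Pre_)
  else if i = j then
    match PySem.List.pyGet? s i with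
    | some a => acc ++ [a]
    | none => acc      -- IndexError (outside Pre_)
  else acc
termination_by (j - i).toNat
decreasing_by omega

def recursive_scramble_py (some_string : String) (new_string : String) (start_index : Int) (end_index : Int) : String :=
  String.ofList (recursive_scramble_pyCore some_string.toList new_string.toList start_index end_index)

-- ===== PORT B =====
-- literal transliteration of Source B: pairs = end-start+1; for k in range((pairs+1)//2):
--   append some_string[start+k] and, if the two positions differ, some_string[end-k].
def recursive_scramble_py_alt (some_string : String) (new_string : String) (start_index : Int) (end_index : Int) : String :=
  String.ofList ((PySem.List.pyRange 0 (PySem.Int.floordiv ((end_index - start_index + 1) + 1) 2) 1).foldl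
    (fun acc k =>
      acc ++ ((PySem.List.pyGet? some_string.toList (start_index + k)).toList ++
        (if start_index + k ≠ end_index - k then (PySem.List.pyGet? some_string.toList (end_index - k)).toList else [])))
    new_string.toList)

-- ===== PRECONDITION & SPEC =====
-- Pre_ excludes exactly the inputs where Python A raises IndexError: some visited index out of
-- range, i.e. start_index ≤ end_index with start_index < -len(some_string) or end_index ≥ len(some_string).
def Pre_recursive_scramble_py (some_string : String) (new_string : String) (start_index : Int) (end_index : Int) : Prop :=
  end_index < start_index ∨
    (-(some_string.toList.length : Int) ≤ start_index ∧ end_index < (some_string.toList.length : Int))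
instance (some_string : String) (new_string : String) (start_index : Int) (end_index : Int) : Decidable (Pre_recursive_scramble_py some_string new_string start_index end_index) := by unfold Pre_recursive_scramble_py; infer_instance

def pvWitness_recursive_scramble_py : String × String × Int × Int := ("abcde", "x", 0, 4)

def Spec_recursive_scramble_py (some_string : String) (new_string : String) (start_index : Int) (end_index : Int) (out : String) : Prop := out = recursive_scramble_py_alt some_string new_string start_index end_index
instance (some_string : String) (new_string : String) (start_index : Int) (end_index : Int) (out : String) : Decidable (Spec_recursive_scramble_py some_string new_string start_index end_index out) := by unfold Spec_recursive_scramble_py; infer_instance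

-- ===== CLAIM (what is proved, stated in full; the proofs are below) =====
def Claim_equal_recursive_scramble_py : Prop := ∀ (some_string : String) (new_string : String) (start_index : Int) (end_index : Int), Dom_recursive_scramble_py some_string new_string start_index end_index → Pre_recursive_scramble_py some_string new_string start_index end_index → Spec_recursive_scramble_py some_string new_string start_index end_index (recursive_scramble_py some_string new_string start_index end_index)

-- ===== LEMMAS AND PROOFS =====

-- one iteration of B's loop, as a chunk of output
def rsPiece (s : List Char) (i j k : Int) : List Char :=
  (PySem.List.pyGet? s (i + k)).toList ++
    (if i + k ≠ j - k then (PySem.List.pyGet? s (j - k)).toList else [])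

theorem rsPiece_shift (s : List Char) (i j k : Int) :
    rsPiece s i j (k + 1) = rsPiece s (i + 1) (j - 1) k := by
  simp only [rsPiece]
  have h1 : i + (k + 1) = i + 1 + k := by ring
  have h2 : j - (k + 1) = j - 1 - k := by ring
  rw [h1, h2]

theorem pyGet?_some_of_range (s : List Char) (i : Int)
    (h1 : -(s.length : Int) ≤ i) (h2 : i < (s.length : Int)) :
    ∃ a, PySem.List.pyGet? s i = some a := by
  cases hg : PySem.List.pyGet? s i with
  | some a => exact ⟨a, rfl⟩
  | none =>
    rw [PySem.List.pyGet?_eq_none_iff] at hg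
    exact absurd ⟨h1, h2⟩ hg

-- core invariant: A's recursion equals the concatenation of B's loop chunks
theorem rsCore_eq (n : Nat) : ∀ (s acc : List Char) (i j : Int),
    n = (PySem.Int.floordiv ((j - i + 1) + 1) 2).toNat →
    (i ≤ j → -(s.length : Int) ≤ i ∧ j < (s.length : Int)) →
    recursive_scramble_pyCore s acc i j
      = acc ++ (List.range n).flatMap (fun (k : Nat) => rsPiece s i j (k : Int)) := by
  induction n with
  | zero =>
    intro s acc i j hn _
    rw [PySem.Int.floordiv_eq_ediv_of_pos (by omega)] at hn
    rw [recursive_scramble_pyCore]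
    simp [show ¬ i < j by omega, show ¬ i = j by omega]
  | succ m ih =>
    intro s acc i j hn hv
    rw [PySem.Int.floordiv_eq_ediv_of_pos (by omega)] at hn
    have hij : i ≤ j := by omega
    obtain ⟨hlo, hhi⟩ := hv hij
    rw [List.range_succ_eq_map]
    by_cases heq : i = j
    · -- middle character
      subst heq
      have hm : m = 0 := by omega
      subst hm
      obtain ⟨a, ha⟩ := pyGet?_some_of_range s i hlo hhi
      rw [recursive_scramble_pyCore]
      simp [ha, rsPiece]
    · have hlt : i < j := by omega
      obtain ⟨a, ha⟩ := pyGet?_some_of_range s i hlo (by omega)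
      obtain ⟨b, hb⟩ := pyGet?_some_of_range s j (by omega) hhi
      rw [recursive_scramble_pyCore]
      simp only [hlt, dif_pos, ha, hb]
      rw [ih s (acc ++ [a] ++ [b]) (i + 1) (j - 1)
        (by rw [PySem.Int.floordiv_eq_ediv_of_pos (by omega)]
            have h2 : j - 1 - (i + 1) + 1 + 1 = j - i := by ring
            rw [h2]; omega)
        (fun _ => ⟨by omega, by omega⟩)]
      have hchunk : rsPiece s i j ((0 : Nat) : Int) = [a] ++ [b] := by
        simp [rsPiece, ha, hb, heq]
      have hshift : ∀ k : Nat, rsPiece s i j ((Nat.succ k : Nat) : Int)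
          = rsPiece s (i + 1) (j - 1) (k : Int) := by
        intro k
        have hc : ((Nat.succ k : Nat) : Int) = (k : Int) + 1 := by push_cast; ring
        rw [hc, rsPiece_shift]
      rw [List.flatMap_cons, List.flatMap_map, hchunk]
      simp only [hshift]
      simp [List.append_assoc]

-- ===== VERDICT (by name: the statement is the Claim_ definition above) =====
theorem recursive_scramble_py_spec : Claim_equal_recursive_scramble_py := by
  intro some_string new_string start_index end_index _ hpre
  unfold Spec_recursive_scramble_py recursive_scramble_py recursive_scramble_py_alt
  rw [PySem.List.foldl_append_eq_flatMap]
  rw [rsCore_eq ((PySem.Int.floordiv ((end_index - start_index + 1) + 1) 2).toNat)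
      some_string.toList new_string.toList start_index end_index rfl
      (by intro hij
          rcases hpre with h | h
          · omega
          · exact h)]
  congr 1
  congr 1
  rw [PySem.List.pyRange_one, List.flatMap_map]
  simp only [Int.sub_zero, zero_add]
  apply List.flatMap_congr
  intro k _
  simp [rsPiece]
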